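-- pv_equiv track=rewrite | github.com/KevinMacTec/RedesComp11 | redes2024_ob1/part2/XtestB/jsonrpc_redes/utils.py | valid_count
-- ===== SOURCE A (Python) =====
-- def valid_count(mensaje,caracter):
--     resultado = 0
--     cant_posible_entre_comillas = 0
--     contador = 0
--     tipo_comilla = 0 # 0 == sin ; 1 == '' ; 2 == ""
--     while(contador < len(mensaje)):
--         if(tipo_comilla == 0):
--             if(mensaje[contador] == "'"):
--                 tipo_comilla = 1
--                 cant_posible_entre_comillas = 0
--             elif(mensaje[contador] == '"'):
--                 tipo_comilla = 2
--                 cant_posible_entre_comillas = 0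
--             elif(mensaje[contador] == caracter):
--                 resultado += 1
--         elif (tipo_comilla == 1):
--             if(mensaje[contador] == "'"):
--                 cant_posible_entre_comillas = 0
--                 tipo_comilla = 0
--             elif(mensaje[contador] == caracter):
--                 cant_posible_entre_comillas += 1
--         else:
--             if(mensaje[contador] == '"'):
--                 cant_posible_entre_comillas = 0
--                 tipo_comilla = 0
--             elif(mensaje[contador] == caracter):
--                 cant_posible_entre_comillas += 1
--         contador += 1
--     resultado += cant_posible_entre_comillas
--     return resultado
-- ===== SOURCE B (Python) =====
-- def valid_count(mensaje, caracter):
--     # Index scan with an inner span-consuming loop instead of A's tipo_comilla state machine.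
--     resultado = 0
--     i = 0
--     n = len(mensaje)
--     while i < n:
--         ch = mensaje[i]
--         if ch == "'" or ch == '"':
--             q = ch
--             i += 1
--             local = 0
--             while i < n and mensaje[i] != q:
--                 if mensaje[i] == caracter:
--                     local += 1
--                 i += 1
--             if i < n:
--                 i += 1  # closing quote found: closed span contributes nothing
--             else:
--                 resultado += local  # unclosed final span contributes
--         else:
--             if ch == caracter:
--                 resultado += 1
--             i += 1
--     return resultado
-- ===== Notes on version B (the rewrite author's own statement) =====
-- stated objective: alternative
-- what changed: Replaced A's single-pass tipo_comilla state machine (three-way state carried through every iteration) with an index scan that, on meeting a quote, runs an inner loop consuming the whole span up to the matching quote, discarding its local count if closed and adding it if the string ends unclosed.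
import Mathlib
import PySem

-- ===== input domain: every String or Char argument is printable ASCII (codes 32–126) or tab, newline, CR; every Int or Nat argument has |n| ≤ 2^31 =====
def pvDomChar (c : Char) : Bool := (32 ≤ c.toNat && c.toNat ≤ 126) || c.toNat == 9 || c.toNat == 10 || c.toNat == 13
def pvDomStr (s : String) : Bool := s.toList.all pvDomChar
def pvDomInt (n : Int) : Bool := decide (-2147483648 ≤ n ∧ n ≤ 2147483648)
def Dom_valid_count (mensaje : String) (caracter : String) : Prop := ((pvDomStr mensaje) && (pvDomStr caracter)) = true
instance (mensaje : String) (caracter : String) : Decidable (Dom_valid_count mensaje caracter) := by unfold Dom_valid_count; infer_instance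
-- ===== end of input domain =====

-- B replaces A's three-way quote state machine with a nested span-consuming loop; objective: alternative decomposition (same cost).

-- ===== PORT A =====
-- A's while loop is a sequential scan over mensaje's characters carrying (resultado, cant_posible_entre_comillas, tipo_comilla); ported as a foldl with that exact state.
def stepA (caracter : String) (st : Int × Int × Int) (c : Char) : Int × Int × Int :=
  match st with
  | (res, cant, tipo) =>
    if tipo = 0 then
      if c = '\'' then (res, 0, 1)
      else if c = '"' then (res, 0, 2)
      else if caracter.toList = [c] then (res + 1, cant, tipo)
      else (res, cant, tipo)
    else if tipo = 1 then
      if c = '\'' then (res, 0, 0)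
      else if caracter.toList = [c] then (res, cant + 1, tipo)
      else (res, cant, tipo)
    else
      if c = '"' then (res, 0, 0)
      else if caracter.toList = [c] then (res, cant + 1, tipo)
      else (res, cant, tipo)

def valid_count (mensaje : String) (caracter : String) : Int :=
  match mensaje.toList.foldl (stepA caracter) (0, 0, 0) with
  | (res, cant, _) => res + cant

-- ===== PORT B =====
-- inner loop of B: consume characters until the matching quote q or the end; returns (local count, remaining input, whether the span was closed)
def innerScan (caracter : String) (q : Char) : List Char → Int → Int × List Char × Bool
  | [], localCnt => (localCnt, [], false)
  | c :: cs, localCnt =>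
    if c = q then (localCnt, cs, true)
    else innerScan caracter q cs (localCnt + if caracter.toList = [c] then 1 else 0)

-- needed by outerB's termination: the inner loop only consumes input
theorem innerScan_len (caracter : String) (q : Char) :
    ∀ (l : List Char) (k : Int), (innerScan caracter q l k).2.1.length ≤ l.length := by
  intro l
  induction l with
  | nil => intro k; simp [innerScan]
  | cons c cs ih =>
    intro k
    simp only [innerScan]
    split
    · simp
    · exact le_trans (ih _) (by simp)

def outerB (caracter : String) : List Char → Int → Int
  | [], res => res
  | c :: cs, res =>
    if c = '\'' ∨ c = '"' then
      let t := innerScan caracter c cs 0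
      if t.2.2 then outerB caracter t.2.1 res
      else res + t.1
    else outerB caracter cs (res + if caracter.toList = [c] then 1 else 0)
termination_by l _ => l.length
decreasing_by
  · have := innerScan_len caracter c cs 0
    simp only [List.length_cons]
    omega
  · simp

def valid_count_alt (mensaje : String) (caracter : String) : Int :=
  outerB caracter mensaje.toList 0

-- ===== PRECONDITION & SPEC =====
def Spec_valid_count (mensaje : String) (caracter : String) (out : Int) : Prop := out = valid_count_alt mensaje caracter
instance (mensaje : String) (caracter : String) (out : Int) : Decidable (Spec_valid_count mensaje caracter out) := by unfold Spec_valid_count; infer_instance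

-- ===== CLAIM (what is proved, stated in full; the proofs are below) =====
def Claim_equal_valid_count : Prop := ∀ (mensaje : String) (caracter : String), Dom_valid_count mensaje caracter → Spec_valid_count mensaje caracter (valid_count mensaje caracter)

-- ===== LEMMAS AND PROOFS =====

-- A's fold from an in-single-quote state equals innerScan followed by the fold from the neutral state
theorem spanLemma1 (caracter : String) :
    ∀ (l : List Char) (res localCnt : Int),
      List.foldl (stepA caracter) (res, localCnt, 1) l =
        (match innerScan caracter '\'' l localCnt with
         | (loc, rest, true) => List.foldl (stepA caracter) (res, (0 : Int), (0 : Int)) rest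
         | (loc, _, false) => (res, loc, 1)) := by
  intro l
  induction l with
  | nil => intro res localCnt; simp [innerScan]
  | cons c cs ih =>
    intro res localCnt
    by_cases hq : c = '\''
    · simp [innerScan, hq, stepA]
    · by_cases hc : caracter.toList = [c]
      · simp [innerScan, hq, hc, stepA, ih]
      · simp [innerScan, hq, hc, stepA, ih]

-- the same for the in-double-quote state
theorem spanLemma2 (caracter : String) :
    ∀ (l : List Char) (res localCnt : Int),
      List.foldl (stepA caracter) (res, localCnt, 2) l =
        (match innerScan caracter '"' l localCnt with
         | (loc, rest, true) => List.foldl (stepA caracter) (res, (0 : Int), (0 : Int)) rest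
         | (loc, _, false) => (res, loc, 2)) := by
  intro l
  induction l with
  | nil => intro res localCnt; simp [innerScan]
  | cons c cs ih =>
    intro res localCnt
    by_cases hq : c = '"'
    · simp [innerScan, hq, stepA]
    · by_cases hc : caracter.toList = [c]
      · simp [innerScan, hq, hc, stepA, ih]
      · simp [innerScan, hq, hc, stepA, ih]

-- main invariant: finishing A's fold from the neutral state equals B's outer loop
theorem mainLemma (caracter : String) :
    ∀ (n : Nat) (l : List Char), l.length ≤ n → ∀ (res : Int),
      (match List.foldl (stepA caracter) (res, (0 : Int), (0 : Int)) l with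
       | (r, cant, _) => r + cant) = outerB caracter l res := by
  intro n
  induction n with
  | zero =>
    intro l hl res
    have : l = [] := List.eq_nil_of_length_eq_zero (Nat.le_zero.mp hl)
    subst this
    simp [outerB]
  | succ n ih =>
    intro l hl res
    cases l with
    | nil => simp [outerB]
    | cons c cs =>
      simp only [List.length_cons] at hl
      by_cases hq1 : c = '\''
      · subst hq1
        rw [show List.foldl (stepA caracter) ((res : Int), (0:Int), (0:Int)) ('\'' :: cs)
              = List.foldl (stepA caracter) (res, 0, 1) cs by simp [stepA]]
        rw [spanLemma1]
        rcases hscan : innerScan caracter '\'' cs 0 with ⟨loc, rest, closed⟩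
        cases closed with
        | true =>
          have hrest : rest.length ≤ n := by
            have := innerScan_len caracter '\'' cs 0
            rw [hscan] at this
            simp at this
            omega
          simp only [outerB, hscan]
          simpa using ih rest hrest res
        | false =>
          simp [outerB, hscan]
      · by_cases hq2 : c = '"'
        · subst hq2
          rw [show List.foldl (stepA caracter) ((res : Int), (0:Int), (0:Int)) ('"' :: cs)
                = List.foldl (stepA caracter) (res, 0, 2) cs by simp [stepA]]
          rw [spanLemma2]
          rcases hscan : innerScan caracter '"' cs 0 with ⟨loc, rest, closed⟩
          cases closed with
          | true =>
            have hrest : rest.length ≤ n := by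
              have := innerScan_len caracter '"' cs 0
              rw [hscan] at this
              simp at this
              omega
            simp only [outerB, hscan]
            simpa using ih rest hrest res
          | false =>
            simp [outerB, hscan]
        · by_cases hc : caracter.toList = [c]
          · rw [show List.foldl (stepA caracter) ((res : Int), (0:Int), (0:Int)) (c :: cs)
                  = List.foldl (stepA caracter) (res + 1, 0, 0) cs by simp [stepA, hq1, hq2, hc]]
            rw [ih cs (by omega) (res + 1)]
            simp [outerB, hq1, hq2, hc]
          · rw [show List.foldl (stepA caracter) ((res : Int), (0:Int), (0:Int)) (c :: cs)
                  = List.foldl (stepA caracter) (res, 0, 0) cs by simp [stepA, hq1, hq2, hc]]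
            rw [ih cs (by omega) res]
            simp [outerB, hq1, hq2, hc]

-- ===== VERDICT (by name: the statement is the Claim_ definition above) =====
theorem valid_count_spec : Claim_equal_valid_count := by
  intro mensaje caracter _
  unfold Spec_valid_count valid_count valid_count_alt
  exact mainLemma caracter mensaje.toList.length mensaje.toList le_rfl 0
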